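-- pv_equiv track=rewrite | github.com/vishwa-patel11/fuse | common/utilities.py | expand_rfm_d
-- ===== SOURCE A (Python) =====
-- def expand_rfm_d(rfm_d):
--   '''
--   TODO
--   '''
--   keys = sorted(list(rfm_d.keys()))[::-1]
--   d = {}
--   mrk = 0
--   for i in range(keys[0], 0, -1):
--     if i in keys:
--       d[i] = rfm_d[i]
--       mrk = i
--     else:
--       d[i] = rfm_d[mrk]
--   return d
-- ===== SOURCE B (Python) =====
-- def expand_rfm_d(rfm_d):
--   # Segment-driven forward fill: walk the present keys (>= 1) in descending
--   # order and fill each gap (lower, upper] with rfm_d[upper] in one inner loop.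
--   pos = sorted((k for k in rfm_d if k >= 1), reverse=True)
--   pairs = []
--   for upper, lower in zip(pos, pos[1:] + [0]):
--     v = rfm_d[upper]
--     for i in range(upper, lower, -1):
--       pairs.append((i, v))
--   return dict(pairs)
-- ===== Notes on version B (the rewrite author's own statement) =====
-- stated objective: faster
-- what changed: A scans every integer from the max key down to 1 testing list membership ('i in keys') to decide present-vs-fill; B sorts the present keys >= 1 descending and fills each gap segment (lower, upper] in one inner loop keyed by the covering present key, then builds the dict from the pair list.
import Mathlib
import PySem

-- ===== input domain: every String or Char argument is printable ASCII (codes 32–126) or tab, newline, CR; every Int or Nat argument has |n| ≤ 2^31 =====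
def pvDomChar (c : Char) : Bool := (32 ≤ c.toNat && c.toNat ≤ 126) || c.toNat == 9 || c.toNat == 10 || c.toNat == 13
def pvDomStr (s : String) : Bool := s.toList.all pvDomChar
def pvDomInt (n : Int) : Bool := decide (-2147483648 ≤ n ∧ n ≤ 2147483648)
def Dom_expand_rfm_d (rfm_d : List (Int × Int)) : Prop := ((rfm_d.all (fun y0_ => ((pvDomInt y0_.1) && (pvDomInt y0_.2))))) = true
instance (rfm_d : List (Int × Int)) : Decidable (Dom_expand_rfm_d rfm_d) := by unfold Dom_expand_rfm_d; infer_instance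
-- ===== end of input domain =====

-- B replaces A's per-index membership scan over range(max,0,-1) by a segment fill driven by the
-- sorted present keys (each gap filled in one inner loop); objective: faster (O(k log k + m) vs O(k*m), measured).


-- ===== PORT A =====
-- keys = sorted(list(rfm_d.keys()))[::-1]  ([::-1] is reverse: PySem.List.slice?_none_none_neg_one);
-- loop 'for i in range(keys[0], 0, -1)' as a foldl over PySem.List.pyRange carrying (d, mrk).
-- rfm_d[i] is ported as getD _ 0: in the then-branch i ∈ keys so the KeyError default is unreachable,
-- and mrk ∈ keys whenever the else-branch reads it (the first loop index keys[0] is in keys).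
def expand_rfm_d (rfm_d : List (Int × Int)) : List (Int × Int) :=
  let d0 := PySem.Dict.ofList rfm_d
  let keys := (PySem.List.sorted (PySem.Dict.keys d0) (fun k => k) false).reverse
  match PySem.List.pyGet? keys 0 with
  | none => []                          -- keys[0] raises IndexError: excluded by Pre_
  | some k0 =>
    (((PySem.List.pyRange k0 0 (-1)).foldl
        (fun (st : PySem.Dict Int Int × Int) i =>
          if i ∈ keys then (st.1.insert i (d0.getD i 0), i)
          else (st.1.insert i (d0.getD st.2 0), st.2))
        (PySem.Dict.empty, 0)).1).items

-- ===== PORT B =====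
-- pos = sorted((k for k in rfm_d if k >= 1), reverse=True); for (upper, lower) in zip(pos, pos[1:]+[0])
-- append (i, rfm_d[upper]) for i in range(upper, lower, -1); return dict(pairs).
def expand_rfm_d_alt (rfm_d : List (Int × Int)) : List (Int × Int) :=
  let d0 := PySem.Dict.ofList rfm_d
  let pos := PySem.List.sorted ((PySem.Dict.keys d0).filter (fun k => decide (1 ≤ k))) (fun k => k) true
  let pairs := (pos.zip (pos.drop 1 ++ [0])).foldl
      (fun acc ul => acc ++ (PySem.List.pyRange ul.1 ul.2 (-1)).map (fun i => (i, d0.getD ul.1 0))) []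
  (PySem.Dict.ofList pairs).items

-- ===== PRECONDITION & SPEC =====
-- A raises IndexError (keys[0]) exactly on the empty dict; everything else returns normally.
def Pre_expand_rfm_d (rfm_d : List (Int × Int)) : Prop := rfm_d ≠ []
instance (rfm_d : List (Int × Int)) : Decidable (Pre_expand_rfm_d rfm_d) := by unfold Pre_expand_rfm_d; infer_instance
def pvWitness_expand_rfm_d : (List (Int × Int)) := [(3, 7), (-2, 1)]

def Spec_expand_rfm_d (rfm_d : List (Int × Int)) (out : List (Int × Int)) : Prop := out = expand_rfm_d_alt rfm_d
instance (rfm_d : List (Int × Int)) (out : List (Int × Int)) : Decidable (Spec_expand_rfm_d rfm_d out) := by unfold Spec_expand_rfm_d; infer_instance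

-- ===== CLAIM (what is proved, stated in full; the proofs are below) =====
def Claim_equal_expand_rfm_d : Prop := ∀ (rfm_d : List (Int × Int)), Dom_expand_rfm_d rfm_d → Pre_expand_rfm_d rfm_d → Spec_expand_rfm_d rfm_d (expand_rfm_d rfm_d)

-- ===== LEMMAS AND PROOFS =====

-- A's loop body, abstracted over the membership list and the dict.
def pvStepA (keys : List Int) (d0 : PySem.Dict Int Int) (st : PySem.Dict Int Int × Int) (i : Int) :
    PySem.Dict Int Int × Int :=
  if i ∈ keys then (st.1.insert i (d0.getD i 0), i)
  else (st.1.insert i (d0.getD st.2 0), st.2)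

-- A run of A's loop over (l, a] that meets no present key is a constant fill with rfm_d[m].
theorem pvElseRun (keys : List Int) (d0 : PySem.Dict Int Int) :
    ∀ (n : Nat) (a l : Int) (d : PySem.Dict Int Int) (m : Int),
    (a - l).toNat ≤ n →
    (∀ i, l < i → i ≤ a → i ∉ keys) →
    (PySem.List.pyRange a l (-1)).foldl (pvStepA keys d0) (d, m)
      = (((PySem.List.pyRange a l (-1)).map (fun i => (i, d0.getD m 0))).foldl
          (fun d p => d.insert p.1 p.2) d, m) := by
  intro n
  induction n with
  | zero =>
    intro a l d m hn _
    rw [PySem.List.pyRange_neg_one_eq_nil (by omega)]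
    simp
  | succ n ih =>
    intro a l d m hn hout
    by_cases hal : a ≤ l
    · rw [PySem.List.pyRange_neg_one_eq_nil hal]; simp
    · rw [PySem.List.pyRange_neg_one_cons (by omega)]
      have hstep : pvStepA keys d0 (d, m) a = (d.insert a (d0.getD m 0), m) := by
        unfold pvStepA
        rw [if_neg (hout a (by omega) le_rfl)]
      simp only [List.foldl_cons, List.map_cons, hstep]
      exact ih (a - 1) l (d.insert a (d0.getD m 0)) m (by omega)
        (fun i h1 h2 => hout i h1 (by omega))

-- The per-segment pair list B builds.
def pvSegPairs (d0 : PySem.Dict Int Int) (pos : List Int) : List (Int × Int) :=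
  (pos.zip (pos.drop 1 ++ [0])).flatMap
    (fun ul => (PySem.List.pyRange ul.1 ul.2 (-1)).map (fun i => (i, d0.getD ul.1 0)))

-- Main invariant: A's whole loop from u down to 1, with u :: ps the present keys ≥ 1 in
-- descending order, inserts exactly B's segment pairs.
theorem pvMainRun (keys : List Int) (d0 : PySem.Dict Int Int) :
    ∀ (ps : List Int) (u : Int) (d : PySem.Dict Int Int) (m : Int),
    ((u :: ps).Pairwise (· > ·)) →
    (∀ p ∈ u :: ps, 1 ≤ p ∧ p ∈ keys) →
    (∀ k ∈ keys, 1 ≤ k → k ≤ u → k ∈ u :: ps) →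
    ((PySem.List.pyRange u 0 (-1)).foldl (pvStepA keys d0) (d, m)).1
      = (pvSegPairs d0 (u :: ps)).foldl (fun d p => d.insert p.1 p.2) d := by
  intro ps
  induction ps with
  | nil =>
    intro u d m _ hmem hcomp
    obtain ⟨hu1, huk⟩ := hmem u (by simp)
    rw [PySem.List.pyRange_neg_one_cons (by omega)]
    have hstep : pvStepA keys d0 (d, m) u = (d.insert u (d0.getD u 0), u) := by
      unfold pvStepA; rw [if_pos huk]
    simp only [List.foldl_cons, hstep]
    rw [pvElseRun keys d0 (u - 1 - 0).toNat (u - 1) 0 _ u le_rfl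
      (fun i h1 h2 hk => by
        have := hcomp i hk (by omega) (by omega)
        simp at this; omega)]
    have hseg : pvSegPairs d0 [u] = (PySem.List.pyRange u 0 (-1)).map (fun i => (i, d0.getD u 0)) := by
      simp [pvSegPairs]
    rw [hseg, show PySem.List.pyRange u 0 (-1) = u :: PySem.List.pyRange (u - 1) 0 (-1) from
      PySem.List.pyRange_neg_one_cons (by omega)]
    simp
  | cons l rest ih =>
    intro u d m hpw hmem hcomp
    obtain ⟨hu1, huk⟩ := hmem u (by simp)
    obtain ⟨hl1, _⟩ := hmem l (by simp)
    have hlu : l < u := by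
      have := (List.pairwise_cons.mp hpw).1 l (by simp)
      omega
    -- split the countdown at l
    have hsplit : PySem.List.pyRange u 0 (-1)
        = PySem.List.pyRange u l (-1) ++ PySem.List.pyRange l 0 (-1) := by
      rw [PySem.List.pyRange_neg_one_eq_reverse u 0, PySem.List.pyRange_neg_one_eq_reverse u l,
        PySem.List.pyRange_neg_one_eq_reverse l 0,
        PySem.List.pyRange_one_append (0 + 1) (l + 1) (u + 1) (by omega) (by omega)]
      simp
    rw [hsplit, List.foldl_append]
    -- first segment: u then an else-run down to l
    rw [PySem.List.pyRange_neg_one_cons (by omega)]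
    have hstep : pvStepA keys d0 (d, m) u = (d.insert u (d0.getD u 0), u) := by
      unfold pvStepA; rw [if_pos huk]
    simp only [List.foldl_cons, hstep]
    have hnone : ∀ i, l < i → i ≤ u - 1 → i ∉ keys := by
      intro i h1 h2 hk
      have hi := hcomp i hk (by omega) (by omega)
      rcases List.mem_cons.mp hi with h | h
      · omega
      · rcases List.mem_cons.mp h with h' | h'
        · omega
        · have := (List.pairwise_cons.mp (List.pairwise_cons.mp hpw).2).1 i h'
          omega
    rw [pvElseRun keys d0 (u - 1 - l).toNat (u - 1) l _ u le_rfl hnone]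
    -- tail via the induction hypothesis
    rw [ih l _ u
      (List.pairwise_cons.mp hpw).2
      (fun p hp => hmem p (List.mem_cons_of_mem u hp))
      (fun k hk h1 h2 => by
        have := hcomp k hk h1 (by omega)
        rcases List.mem_cons.mp this with h | h
        · omega
        · exact h)]
    -- both sides are foldl-insert over the same concatenated pair list
    show _ = (pvSegPairs d0 (u :: l :: rest)).foldl (fun d p => d.insert p.1 p.2) d
    have hseg : pvSegPairs d0 (u :: l :: rest)
        = ((PySem.List.pyRange u l (-1)).map (fun i => (i, d0.getD u 0)))
            ++ pvSegPairs d0 (l :: rest) := by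
      simp [pvSegPairs]
    rw [hseg, List.foldl_append, PySem.List.pyRange_neg_one_cons (show l < u by omega)]
    simp

-- descending, duplicate-free present keys
theorem pvSortedRevGt (xs : List Int) (hnd : xs.Nodup) :
    (PySem.List.sorted xs (fun k => k) true).Pairwise (· > ·) := by
  have h1 := PySem.List.sorted_pairwise_rev xs (fun k => k)
  have h2 : (PySem.List.sorted xs (fun k => k) true).Nodup :=
    (PySem.List.sorted_perm xs (fun k => k) true).nodup_iff.mpr hnd
  have := List.Pairwise.and h1 h2
  exact this.imp (fun {a b} h => by
    rcases h with ⟨hle, hne⟩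
    omega)

-- ===== VERDICT (by name: the statement is the Claim_ definition above) =====
theorem expand_rfm_d_spec : Claim_equal_expand_rfm_d := by
  intro rfm_d _ hpre
  show expand_rfm_d rfm_d = expand_rfm_d_alt rfm_d
  simp only [expand_rfm_d, expand_rfm_d_alt]
  set d0 := PySem.Dict.ofList rfm_d with hd0
  set keys := (PySem.List.sorted (PySem.Dict.keys d0) (fun k => k) false).reverse with hkeys
  -- membership in keys ↔ membership in d0.keys
  have hmemkeys : ∀ k, k ∈ keys ↔ k ∈ PySem.Dict.keys d0 := by
    intro k
    rw [hkeys, List.mem_reverse, PySem.List.mem_sorted]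
  -- d0.keys is nonempty
  have hk0ne : PySem.Dict.keys d0 ≠ [] := by
    obtain ⟨p, t, rfl⟩ := List.exists_cons_of_ne_nil hpre
    have : p.1 ∈ PySem.Dict.keys d0 := by
      rw [hd0]
      show p.1 ∈ (((p :: t)).foldl (fun d q => d.insert q.1 q.2) PySem.Dict.empty).keys
      rw [PySem.Dict.keys_foldl_insert_key ((p :: t)) (fun q => q.1) (fun _ q => q.2) PySem.Dict.empty]
      have : (PySem.Dict.empty : PySem.Dict Int Int).keys = [] := rfl
      rw [this]
      have := PySem.Set.mem_update ([] : List Int) ((p :: t).map (fun q => q.1)) p.1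
      simp_all
    exact fun h => by simp [h] at this
  have hkeysne : keys ≠ [] := by
    intro h
    have := (PySem.List.sorted_perm (PySem.Dict.keys d0) (fun k => k) false).length_eq
    rw [← List.length_reverse, ← hkeys, h] at this
    exact hk0ne (List.length_eq_zero_iff.mp this.symm)
  obtain ⟨k0, kt, hke⟩ := List.exists_cons_of_ne_nil hkeysne
  have hget : PySem.List.pyGet? keys 0 = some k0 := by
    rw [hke, show (0:Int) = ((0:Nat):Int) from rfl, PySem.List.pyGet?_natCast]
    rfl
  have hk0keys : k0 ∈ keys := by rw [hke]; exact List.mem_cons_self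
  rw [hget]
  -- keys is strictly descending, so k0 is the maximum
  have hkpw : keys.Pairwise (· > ·) := by
    rw [hkeys, List.pairwise_reverse]
    have h1 := PySem.List.sorted_pairwise (PySem.Dict.keys d0) (fun k => k)
    have h2 : (PySem.List.sorted (PySem.Dict.keys d0) (fun k => k) false).Nodup :=
      (PySem.List.sorted_perm (PySem.Dict.keys d0) (fun k => k) false).nodup_iff.mpr
        (PySem.Dict.nodup_keys_ofList rfm_d)
    exact (List.Pairwise.and h1 h2).imp (fun {a b} h => by
      rcases h with ⟨hle, hne⟩; omega)
  have hmax : ∀ k ∈ PySem.Dict.keys d0, k ≤ k0 := by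
    intro k hk
    have hk' : k ∈ keys := (hmemkeys k).mpr hk
    rw [hke] at hk'
    rcases List.mem_cons.mp hk' with h | h
    · omega
    · have := (List.pairwise_cons.mp (hke ▸ hkpw)).1 k h
      omega
  set pos := PySem.List.sorted ((PySem.Dict.keys d0).filter (fun k => decide (1 ≤ k))) (fun k => k) true with hpos
  have hmempos : ∀ k, k ∈ pos ↔ (k ∈ PySem.Dict.keys d0 ∧ 1 ≤ k) := by
    intro k
    rw [hpos, PySem.List.mem_sorted, List.mem_filter]
    simp
  by_cases hk01 : 1 ≤ k0
  · -- pos is nonempty with head k0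
    have hk0pos : k0 ∈ pos := (hmempos k0).mpr ⟨(hmemkeys k0).mp hk0keys, hk01⟩
    have hposne : pos ≠ [] := fun hnil => by rw [hnil] at hk0pos; simp at hk0pos
    obtain ⟨h, t, hpe⟩ := List.exists_cons_of_ne_nil hposne
    have hhk0 : h = k0 := by
      have h1 : ∀ y ∈ (PySem.Dict.keys d0).filter (fun k => decide (1 ≤ k)), y ≤ h :=
        PySem.List.key_head_sorted_rev_ge _ (fun k => k) hpe
      have h2 : k0 ≤ h := h1 k0 (List.mem_filter.mpr ⟨(hmemkeys k0).mp hk0keys, decide_eq_true hk01⟩)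
      have h3 : h ≤ k0 := hmax h ((hmempos h).mp (by rw [hpe]; exact List.mem_cons_self)).1
      omega
    subst hhk0
    have hpospw : pos.Pairwise (· > ·) :=
      pvSortedRevGt _ ((PySem.Dict.nodup_keys_ofList rfm_d).filter _)
    have hmain := pvMainRun keys d0 t h PySem.Dict.empty 0
      (hpe ▸ hpospw)
      (fun p hp => by
        have hp' : p ∈ pos := by rw [hpe]; exact hp
        have := (hmempos p).mp hp'
        exact ⟨this.2, (hmemkeys p).mpr this.1⟩)
      (fun k hk h1 _ => hpe ▸ (hmempos k).mpr ⟨(hmemkeys k).mp hk, h1⟩)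
    show (((PySem.List.pyRange h 0 (-1)).foldl (pvStepA keys d0) (PySem.Dict.empty, 0)).1).items
        = (PySem.Dict.ofList ((pos.zip (pos.drop 1 ++ [0])).foldl
            (fun acc ul => acc ++ (PySem.List.pyRange ul.1 ul.2 (-1)).map (fun i => (i, d0.getD ul.1 0))) [])).items
    rw [hmain, hpe, PySem.List.foldl_append_eq_flatMap
      (fun ul => (PySem.List.pyRange ul.1 ul.2 (-1)).map (fun i => (i, d0.getD ul.1 0)))
      ((h :: t).zip ((h :: t).drop 1 ++ [0])) []]
    rfl
  · -- max key < 1: A's loop is empty and B's filter is empty; both return []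
    have hfil : (PySem.Dict.keys d0).filter (fun k => decide (1 ≤ k)) = [] := by
      rw [List.filter_eq_nil_iff]
      intro k hk
      have := hmax k hk
      simp; omega
    have hposnil : pos = [] := by rw [hpos, hfil]; rfl
    show (((PySem.List.pyRange k0 0 (-1)).foldl (pvStepA keys d0) (PySem.Dict.empty, 0)).1).items
        = (PySem.Dict.ofList ((pos.zip (pos.drop 1 ++ [0])).foldl
            (fun acc ul => acc ++ (PySem.List.pyRange ul.1 ul.2 (-1)).map (fun i => (i, d0.getD ul.1 0))) [])).items
    rw [PySem.List.pyRange_neg_one_eq_nil (by omega), hposnil]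
    rfl
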